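-- pv_equiv track=rewrite | github.com/Therealchainman/archive-cp | completeCells.py | cellCompete
-- ===== SOURCE A (Python) =====
-- def cellCompete(states, days):
--     states = [0] + states + [0] # add two inactive artificial cells around the starting cells
--     for _ in range(days):
--         nstates = [0 for _ in range(len(states))]
--         for i in range(1, len(states)-1):
--             nstates[i] = 0 if states[i-1]==states[i+1] else 1
--         states = nstates
--     return states[1:-1] # remove the two artificial cells
-- ===== SOURCE B (Python) =====
-- def cellCompete(states, days):
--     # Cycle detection: the automaton state space is finite, so instead of
--     # simulating all `days` steps we detect the first repeated state and jump
--     # ahead modulo the cycle length.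
--     def step(s):
--         left = ([0] + s)[:-1]
--         right = (s + [0])[1:]
--         return [0 if l == r else 1 for l, r in zip(left, right)]
--
--     cur = list(states)
--     seen = {}
--     t = 0
--     while t < days:
--         key = tuple(cur)
--         if key in seen:
--             period = t - seen[key]
--             for _ in range((days - t) % period):
--                 cur = step(cur)
--             return cur
--         seen[key] = t
--         cur = step(cur)
--         t += 1
--     return cur
-- ===== Notes on version B (the rewrite author's own statement) =====
-- stated objective: alternative
-- what changed: Replaces A's unconditional day-by-day resimulation of all `days` steps with cycle detection: each state is memoized with its first occurrence time, and on the first repeat the remaining days are reduced modulo the cycle length; it trades a per-day memoization overhead for an early exit when the state sequence becomes periodic (e.g. huge `days` on short rows).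
import Mathlib
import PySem

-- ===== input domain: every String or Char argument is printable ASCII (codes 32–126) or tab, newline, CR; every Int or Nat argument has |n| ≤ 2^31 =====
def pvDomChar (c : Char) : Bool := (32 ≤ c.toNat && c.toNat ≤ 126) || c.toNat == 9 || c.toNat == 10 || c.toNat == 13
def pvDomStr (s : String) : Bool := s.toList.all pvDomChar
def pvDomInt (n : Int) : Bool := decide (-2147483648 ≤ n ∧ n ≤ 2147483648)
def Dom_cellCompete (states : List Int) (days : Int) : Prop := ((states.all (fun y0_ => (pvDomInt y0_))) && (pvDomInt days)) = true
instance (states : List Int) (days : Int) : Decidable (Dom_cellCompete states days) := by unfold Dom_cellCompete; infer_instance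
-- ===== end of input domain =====

-- B replaces A's unconditional day-by-day simulation with cycle detection on the sequence of
-- states, jumping ahead by (days - t) mod the cycle length as soon as a state repeats
-- (a different algorithm of similar cost; the early exit only helps once the sequence cycles).

-- ===== PORT A =====
-- one day of A's loop body: build nstates of zeros, then set the inner cells by index
-- (the indices produced by range(1, len-1) are always in range, so pyGetD/pySetD are exact here)
def dayA (s : List Int) : List Int :=
  let nstates := (PySem.List.pyRange 0 (s.length : Int) 1).map (fun _ => (0 : Int))
  (PySem.List.pyRange 1 ((s.length : Int) - 1) 1).foldl
    (fun ns i => PySem.List.pySetD ns i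
      (if PySem.List.pyGetD s (i - 1) 0 = PySem.List.pyGetD s (i + 1) 0 then 0 else 1)) nstates

def cellCompete (states : List Int) (days : Int) : List Int :=
  let st := [(0 : Int)] ++ states ++ [(0 : Int)]
  let st := (PySem.List.pyRange 0 days 1).foldl (fun s _ => dayA s) st
  PySem.List.slice st (some 1) (some (-1))

-- ===== PORT B =====
-- B's helper `step`: shifted copies of the row zipped together
def stepAlt (s : List Int) : List Int :=
  let left := PySem.List.slice ([(0 : Int)] ++ s) none (some (-1))
  let right := PySem.List.slice (s ++ [(0 : Int)]) (some 1) none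
  (left.zip right).map (fun p => if p.1 = p.2 then (0 : Int) else 1)

-- B's while-loop: simulate, remembering each state's first time in `seen`;
-- on a repeated state jump ahead by (days - t) mod the period
def loopAlt (days : Int) (seen : PySem.Dict (List Int) Int) (cur : List Int) (t : Int) : List Int :=
  if t < days then
    match seen.get? cur with
    | some m => stepAlt^[(PySem.Int.mod (days - t) (t - m)).toNat] cur
    | none => loopAlt days (seen.insert cur t) (stepAlt cur) (t + 1)
  else cur
termination_by (days - t).toNat
decreasing_by omega

def cellCompete_alt (states : List Int) (days : Int) : List Int :=
  loopAlt days PySem.Dict.empty states 0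

-- ===== PRECONDITION & SPEC =====
def Spec_cellCompete (states : List Int) (days : Int) (out : List Int) : Prop := out = cellCompete_alt states days
instance (states : List Int) (days : Int) (out : List Int) : Decidable (Spec_cellCompete states days out) := by unfold Spec_cellCompete; infer_instance

-- ===== CLAIM (what is proved, stated in full; the proofs are below) =====
def Claim_equal_cellCompete : Prop := ∀ (states : List Int) (days : Int), Dom_cellCompete states days → Spec_cellCompete states days (cellCompete states days)

-- ===== LEMMAS AND PROOFS =====

-- stepAlt, elementwise, is A's update rule on the padded row
lemma stepAlt_eq_map (s : List Int) :
    stepAlt s = (List.range s.length).map (fun k =>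
      if ([(0:Int)] ++ s ++ [0]).getD k 0 = ([(0:Int)] ++ s ++ [0]).getD (k + 2) 0 then (0:Int) else 1) := by
  unfold stepAlt
  rw [PySem.List.slice_to_neg_one, PySem.List.slice_from_one]
  apply List.ext_getElem?
  intro j
  by_cases hj : j < s.length
  · rw [List.getElem?_map, List.getElem?_map]
    rw [List.getElem?_eq_getElem (by simp; omega : j < (([(0:Int)] ++ s).dropLast.zip (s ++ [(0:Int)]).tail).length),
        List.getElem?_eq_getElem (by simpa using hj)]
    simp only [List.getElem_zip, List.getElem_range, Option.map_some]
    have eL : (([(0:Int)] ++ s).dropLast)[j]'(by simp; omega) = ([(0:Int)] ++ s ++ [0]).getD j 0 := by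
      rw [List.getElem_dropLast, List.getD_eq_getElem _ _ (by simp; omega)]
      simp only [List.append_assoc, List.getElem_append, List.length_cons, List.length_nil]
      split_ifs <;> first | rfl | omega
    have eR : ((s ++ [(0:Int)]).tail)[j]'(by simp; omega) = ([(0:Int)] ++ s ++ [0]).getD (j + 2) 0 := by
      rw [List.getElem_tail, List.getD_eq_getElem _ _ (by simp; omega)]
      simp only [List.append_assoc, List.getElem_append, List.length_cons, List.length_nil]
      split_ifs <;> first | rfl | omega
    simp only [eL, eR]
  · rw [List.getElem?_eq_none (by simp; omega), List.getElem?_eq_none (by simp; omega)]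

-- a fold writing v k at position 1+k, for k = 0..n-1, keeps l0's borders
lemma foldl_set_range (v : Nat → Int) (n : Nat) (l0 : List Int) (h : n + 1 ≤ l0.length) :
    (List.range n).foldl (fun ns k => ns.set (1 + k) (v k)) l0
      = l0.take 1 ++ (List.range n).map v ++ l0.drop (n + 1) := by
  induction n with
  | zero => simpa using (List.take_append_drop 1 l0).symm
  | succ n ih =>
      rw [List.range_succ, List.foldl_append, List.foldl_cons, List.foldl_nil, ih (by omega)]
      have ht1 : (List.take 1 l0).length = 1 := by simp; omega
      have hm : (List.map v (List.range n)).length = n := by simp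
      rw [List.append_assoc, List.set_append, ht1, if_neg (by omega)]
      rw [List.set_append, hm, if_neg (by omega)]
      simp only [show 1 + n - 1 = n from by omega, Nat.sub_self]
      rw [List.drop_eq_getElem_cons (show n + 1 < l0.length by omega), List.set_cons_zero]
      simp [List.map_append, List.append_assoc]

-- one day of A on the padded row is stepAlt on the inner row
lemma dayA_eq (s : List Int) : dayA ([0] ++ s ++ [0]) = [0] ++ stepAlt s ++ [0] := by
  unfold dayA
  rw [PySem.List.pyRange_one, PySem.List.pyRange_one]
  simp only [List.length_append, List.length_cons, List.length_nil, List.foldl_map, List.map_map]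
  norm_num
  have hcast : ∀ (x : List Int) (y : Nat) (v : Int),
      PySem.List.pySetD x (1 + (y:Int)) v = x.set (1 + y) v := by
    intro x y v
    rw [show (1:Int) + (y:Int) = ((1 + y : Nat) : Int) by push_cast; ring, PySem.List.pySetD_natCast]
  have hget : ∀ (y : Nat), PySem.List.pyGetD (0 :: (s ++ [0])) (1 + (y:Int) + 1) 0
      = (0 :: (s ++ [0])).getD (y + 2) 0 := by
    intro y
    rw [show (1:Int) + (y:Int) + 1 = ((y + 2 : Nat) : Int) by push_cast; ring,
      PySem.List.pyGetD_natCast]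
  simp only [hcast, hget]
  have hrep : List.map ((fun _ => (0:Int)) ∘ fun k : Nat => (k : Int))
      (List.range (1 + (s.length:Int) + 1).toNat) = List.replicate (s.length + 2) 0 := by
    rw [show ((1:Int) + (s.length:Int) + 1).toNat = s.length + 2 by omega]
    simp only [Function.comp_def]
    rw [List.map_const']
    simp
  rw [hrep]
  rw [foldl_set_range _ _ _ (by simp)]
  rw [stepAlt_eq_map]
  simp [List.getD_eq_getElem?_getD]

lemma foldl_dayA (l : List Int) (x : List Int) :
    l.foldl (fun s _ => dayA s) ([0] ++ x ++ [0]) = [0] ++ stepAlt^[l.length] x ++ [0] := by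
  induction l generalizing x with
  | nil => simp
  | cons a l ih =>
      simp only [List.foldl_cons, List.length_cons, dayA_eq, ih,
        Function.iterate_succ_apply]

lemma slice_one_negone (x : List Int) :
    PySem.List.slice ([(0:Int)] ++ x ++ [0]) (some 1) (some (-1)) = x := by
  simp [PySem.List.slice, PySem.List.clampIdx]
  rw [if_neg (by omega)]
  simp [List.take_left' (l₂ := [(0:Int)]) rfl]

lemma cellCompete_eq_iter (states : List Int) (days : Int) :
    cellCompete states days = stepAlt^[days.toNat] states := by
  show PySem.List.slice ((PySem.List.pyRange 0 days 1).foldl (fun s _ => dayA s)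
      ([(0:Int)] ++ states ++ [(0:Int)])) (some 1) (some (-1)) = stepAlt^[days.toNat] states
  rw [foldl_dayA, PySem.List.length_pyRange_one, slice_one_negone]
  norm_num

lemma iter_shift {α : Type} (f : α → α) (x : α) (M T : Nat) (h : f^[M] x = f^[T] x) (r : Nat) :
    f^[M + r] x = f^[T + r] x := by
  rw [Nat.add_comm M r, Nat.add_comm T r, Function.iterate_add_apply, h,
    ← Function.iterate_add_apply]

lemma iter_mod {α : Type} (f : α → α) (x : α) (M P : Nat) (hP : 0 < P)
    (h : f^[M + P] x = f^[M] x) : ∀ r, f^[M + r] x = f^[M + r % P] x := by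
  intro r
  induction r using Nat.strong_induction_on with
  | _ r ih =>
    by_cases hr : r < P
    · rw [Nat.mod_eq_of_lt hr]
    · have hPr : P ≤ r := Nat.le_of_not_lt hr
      have h1 : f^[M + r] x = f^[M + (r - P)] x := by
        have e : M + r = (M + P) + (r - P) := by omega
        rw [e, iter_shift f x (M + P) M h]
      rw [h1, ih (r - P) (by omega), Nat.mod_eq_sub_mod hPr]

-- loop invariant for B's while loop: `cur` is the t-th iterate, and `seen` maps each
-- recorded state to the (unique, earlier) time it occurred
lemma loopAlt_correct (s0 : List Int) (days : Int) :
    ∀ (N : Nat) (seen : PySem.Dict (List Int) Int) (cur : List Int) (t : Int),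
      (days - t).toNat ≤ N → 0 ≤ t → t ≤ max days 0 →
      cur = stepAlt^[t.toNat] s0 →
      (∀ k v, seen.get? k = some v → 0 ≤ v ∧ v < t ∧ k = stepAlt^[v.toNat] s0) →
      loopAlt days seen cur t = stepAlt^[days.toNat] s0 := by
  intro N
  induction N with
  | zero =>
      intro seen cur t hfuel ht0 htm hcur _
      rw [loopAlt, if_neg (by omega)]
      rw [hcur, show t.toNat = days.toNat from by omega]
  | succ N ih =>
      intro seen cur t hfuel ht0 htm hcur hinv
      rw [loopAlt]
      by_cases hlt : t < days
      · rw [if_pos hlt]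
        rcases hget : seen.get? cur with _ | m
        · -- not seen before: record and continue
          show loopAlt days (seen.insert cur t) (stepAlt cur) (t + 1) = stepAlt^[days.toNat] s0
          refine ih (seen.insert cur t) (stepAlt cur) (t + 1) (by omega) (by omega) (by omega) ?_ ?_
          · rw [hcur, show (t + 1).toNat = t.toNat + 1 from by omega,
              Function.iterate_succ_apply']
          · intro k v hkv
            rw [PySem.Dict.get?_insert] at hkv
            split_ifs at hkv with hk
            · obtain rfl : t = v := by injection hkv
              exact ⟨ht0, by omega, hk ▸ hcur⟩
            · obtain ⟨h1, h2, h3⟩ := hinv k v hkv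
              exact ⟨h1, by omega, h3⟩
        · -- cycle found: jump ahead modulo the period
          obtain ⟨hm0, hmt, hcurM⟩ := hinv cur m hget
          have hP : (0:Int) < t - m := by omega
          show stepAlt^[(PySem.Int.mod (days - t) (t - m)).toNat] cur = stepAlt^[days.toNat] s0
          rw [PySem.Int.mod_eq_emod_of_pos hP]
          rw [show days - t = (((days.toNat - t.toNat : Nat)) : Int) from by omega,
            show t - m = ((t.toNat - m.toNat : Nat) : Int) from by omega,
            ← Int.natCast_mod, Int.toNat_natCast]
          set M := m.toNat
          set T := t.toNat
          set D := days.toNat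
          set P := T - M with hPdef
          have hMP : M + P = T := by omega
          have hPpos : 0 < P := by omega
          have hMT : stepAlt^[M] s0 = stepAlt^[T] s0 := by rw [← hcurM, hcur]
          have hper : stepAlt^[M + P] s0 = stepAlt^[M] s0 := by rw [hMP, hMT]
          calc stepAlt^[(D - T) % P] cur
              = stepAlt^[(D - T) % P] (stepAlt^[M] s0) := by rw [← hcurM]
            _ = stepAlt^[M + (D - T) % P] s0 := by
                rw [Nat.add_comm, Function.iterate_add_apply]
            _ = stepAlt^[M + (D - T)] s0 := (iter_mod stepAlt s0 M P hPpos hper (D - T)).symm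
            _ = stepAlt^[T + (D - T)] s0 := by
                rw [Nat.add_comm M _, Nat.add_comm T _, Function.iterate_add_apply,
                  Function.iterate_add_apply, hMT]
            _ = stepAlt^[D] s0 := by rw [show T + (D - T) = D from by omega]
      · rw [if_neg hlt]
        rw [hcur, show t.toNat = days.toNat from by omega]

-- ===== VERDICT (by name: the statement is the Claim_ definition above) =====
theorem cellCompete_spec : Claim_equal_cellCompete := by
  intro states days _
  unfold Spec_cellCompete cellCompete_alt
  rw [cellCompete_eq_iter]
  exact (loopAlt_correct states days (days - 0).toNat PySem.Dict.empty states 0 le_rfl le_rfl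
    (by omega) (by simp) (by intro k v h; simp [PySem.Dict.get?_empty] at h)).symm
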